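-- pv_equiv track=rewrite | github.com/RitikaKulshresth/python-practice | GFG_minimum_indexed_character.py | minimum_indexed_character
-- ===== SOURCE A (Python) =====
-- def minimum_indexed_character(S,patt):
--     dict1={}
--     for i in range(0,len(S)):
--         if S[i] not in dict1:
--             dict1[S[i]]=[1,i]
--         else:
--             dict1[S[i]][0]+=1
--     min_Idx=len(S)
--
--     for ele in dict1:
--         if ele in patt:
--             if dict1[ele][1]<min_Idx:
--                 min_Idx=dict1[ele][1]
--
--     if  min_Idx != len(S):
--         return S[min_Idx]
--     else:
--         return '$'
-- ===== SOURCE B (Python) =====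
-- def minimum_indexed_character(S, patt):
--     pset = set(patt)
--     for ch in S:
--         if ch in pset:
--             return ch
--     return '$'
-- ===== Notes on version B (the rewrite author's own statement) =====
-- stated objective: simpler
-- what changed: Replaces A's two-pass build-a-dict-of-counts-and-first-indices then min-over-keys scan with a single early-returning forward scan of S against a set built from patt.
import Mathlib
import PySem

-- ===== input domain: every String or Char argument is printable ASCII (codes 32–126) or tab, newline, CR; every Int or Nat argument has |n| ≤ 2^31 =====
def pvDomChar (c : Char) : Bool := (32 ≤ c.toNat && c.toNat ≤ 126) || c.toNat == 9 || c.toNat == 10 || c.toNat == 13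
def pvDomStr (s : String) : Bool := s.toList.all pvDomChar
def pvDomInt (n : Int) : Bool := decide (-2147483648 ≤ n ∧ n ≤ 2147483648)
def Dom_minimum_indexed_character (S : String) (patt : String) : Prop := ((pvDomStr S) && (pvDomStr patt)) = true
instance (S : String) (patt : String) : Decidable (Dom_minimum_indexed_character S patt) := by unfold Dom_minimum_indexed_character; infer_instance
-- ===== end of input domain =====

-- B replaces A's build-a-dict-then-min-over-keys two-pass structure with a single
-- early-returning forward scan of S against a set of patt (objective: simpler).

-- ===== PORT A =====
-- one iteration of A's first loop: the body of 'for i in range(0, len(S))'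
def pvStepA (l : List Char) (d : PySem.Dict Char (Int × Int)) (i : Int) :
    PySem.Dict Char (Int × Int) :=
  let c := PySem.List.pyGetD l i ' '
  if d.contains c = false then d.insert c (1, i)
  else d.modify c (0, 0) (fun v => (v.1 + 1, v.2))

-- A's first loop: dict1 = {char ↦ [count, first index]}
def pvBuildA (l : List Char) : PySem.Dict Char (Int × Int) :=
  (PySem.List.pyRange 0 (l.length : Int) 1).foldl (pvStepA l) PySem.Dict.empty

-- A's second loop: 'for ele in dict1: if ele in patt: …' updating min_Idx
def pvScanA (d : PySem.Dict Char (Int × Int)) (patt : String) (init : Int) : Int :=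
  d.keys.foldl (fun m ele =>
    if PySem.Str.isIn (String.ofList [ele]) patt then
      if (d.getD ele (0, 0)).2 < m then (d.getD ele (0, 0)).2 else m
    else m) init

def minimum_indexed_character (S : String) (patt : String) : String :=
  let l := S.toList
  let d := pvBuildA l
  let minIdx := pvScanA d patt (l.length : Int)
  if minIdx ≠ (l.length : Int) then String.ofList [PySem.List.pyGetD l minIdx ' ']
  else "$"

-- ===== PORT B =====
-- B's loop: 'for ch in S: if ch in pset: return ch' / 'return "$"'
def pvScanB (pset : PySem.Set Char) : List Char → String
  | [] => "$"
  | c :: rest => if pset.contains c then String.ofList [c] else pvScanB pset rest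

def minimum_indexed_character_alt (S : String) (patt : String) : String :=
  pvScanB (PySem.Set.ofList patt.toList) S.toList

-- ===== PRECONDITION & SPEC =====
def Spec_minimum_indexed_character (S : String) (patt : String) (out : String) : Prop := out = minimum_indexed_character_alt S patt
instance (S : String) (patt : String) (out : String) : Decidable (Spec_minimum_indexed_character S patt out) := by unfold Spec_minimum_indexed_character; infer_instance

-- ===== CLAIM (what is proved, stated in full; the proofs are below) =====
def Claim_equal_minimum_indexed_character : Prop := ∀ (S : String) (patt : String), Dom_minimum_indexed_character S patt → Spec_minimum_indexed_character S patt (minimum_indexed_character S patt)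

-- ===== LEMMAS AND PROOFS =====

-- 'ele in patt' (A) and 'ch in set(patt)' (B) test the same thing for a single char
theorem pv_cond_eq (k : Char) (patt : String) :
    PySem.Str.isIn (String.ofList [k]) patt = (PySem.Set.ofList patt.toList).contains k := by
  rw [PySem.Str.isIn_eq]
  have h1 : (String.ofList [k]).toList = [k] := by simp
  rw [h1, Bool.eq_iff_iff, PySem.Chars.isIn_iff_infix, List.singleton_infix_iff,
    PySem.Set.contains_iff, PySem.Set.mem_ofList]

theorem pv_findIdx_beq_lt (l : List Char) (c : Char) (hc : c ∈ l) :
    List.findIdx (fun x => x == c) l < l.length := by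
  rcases Nat.lt_or_ge (List.findIdx (fun x => x == c) l) l.length with h | h
  · exact h
  · have heq : List.findIdx (fun x => x == c) l = l.length :=
      Nat.le_antisymm List.findIdx_le_length h
    have := (List.findIdx_eq_length.mp heq) c hc
    simp at this

theorem pv_findIdx_beq_append (l t : List Char) (c : Char) (hc : c ∈ l) :
    List.findIdx (fun x => x == c) (l ++ t) = List.findIdx (fun x => x == c) l := by
  rw [List.findIdx_append, if_pos (pv_findIdx_beq_lt l c hc)]

-- characterisation of A's dict: keys are the distinct chars of l in first-occurrence
-- order, and the stored second component is the first index of the key in l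
theorem pv_buildA_spec (l : List Char) :
    (pvBuildA l).keys = PySem.Set.ofList l ∧
    ∀ c ∈ l, ((pvBuildA l).getD c (0, 0)).2 = (List.findIdx (fun x => x == c) l : Int) := by
  induction l using List.reverseRecOn with
  | nil =>
    constructor
    · simp [pvBuildA, PySem.List.pyRange_one_eq_nil (le_refl 0), PySem.Set.ofList]
    · intro c hc; simp at hc
  | append_singleton l c ih =>
    obtain ⟨ihk, ihv⟩ := ih
    have hcl : ∀ c' ∈ l, (pvBuildA l).contains c' = true := by
      intro c' hc'
      rw [PySem.Dict.contains_iff_mem_keys, ihk, PySem.Set.mem_ofList]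
      exact hc'
    have hunfold : pvBuildA (l ++ [c]) = pvStepA (l ++ [c]) (pvBuildA l) (l.length : Int) := by
      unfold pvBuildA
      have hlen : ((l ++ [c]).length : Int) = (l.length : Int) + 1 := by
        simp
      rw [hlen, PySem.List.pyRange_one_succ_right (by positivity), List.foldl_append]
      simp only [List.foldl_cons, List.foldl_nil]
      congr 1
      apply PySem.List.foldl_congr_mem
      intro acc i hi
      obtain ⟨h0, h1⟩ := (PySem.List.mem_pyRange_one).mp hi
      unfold pvStepA
      have hb : i < ((l ++ [c]).length : Int) := by simp; omega
      rw [PySem.List.pyGetD_eq_getElem (l ++ [c]) ' ' h0 hb,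
        PySem.List.pyGetD_eq_getElem l ' ' h0 h1,
        List.getElem_append_left (by omega)]
    have hget : PySem.List.pyGetD (l ++ [c]) (l.length : Int) ' ' = c := by
      rw [PySem.List.pyGetD_eq_getElem (l ++ [c]) ' ' (by positivity) (by simp)]
      simp
    have hofl : PySem.Set.ofList (l ++ [c]) = PySem.Set.add (PySem.Set.ofList l) c := by
      rw [PySem.Set.ofList_eq_foldl, PySem.Set.ofList_eq_foldl, List.foldl_append]
      rfl
    by_cases hc : c ∈ l
    · -- c already a key: the else-branch (modify) runs
      have hcont : (pvBuildA l).contains c = true := hcl c hc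
      have hstep : pvBuildA (l ++ [c]) =
          (pvBuildA l).modify c (0, 0) (fun v => (v.1 + 1, v.2)) := by
        rw [hunfold]; unfold pvStepA
        rw [hget]; simp [hcont]
      constructor
      · rw [hstep, PySem.Dict.keys_modify, PySem.Dict.keys_insert_of_contains _ _ hcont,
          ihk, hofl]
        simp [PySem.Set.add]
        exact hc
      · intro c' hc'
        rw [hstep, PySem.Dict.getD_modify]
        by_cases he : c' = c
        · rw [if_pos he, he]
          show ((pvBuildA l).getD c (0, 0)).2 = _
          rw [ihv c hc, pv_findIdx_beq_append l [c] c hc]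
        · have hc'l : c' ∈ l := by
            rcases List.mem_append.mp hc' with h | h
            · exact h
            · simp at h; exact absurd h he
          rw [if_neg he, ihv c' hc'l, pv_findIdx_beq_append l [c] c' hc'l]
    · -- c is fresh: the insert branch runs
      have hcont : (pvBuildA l).contains c = false := by
        rcases h : (pvBuildA l).contains c with _ | _
        · rfl
        · exact absurd ((PySem.Set.mem_ofList l c).mp
            (ihk ▸ (PySem.Dict.contains_iff_mem_keys _ _).mp h)) hc
      have hstep : pvBuildA (l ++ [c]) = (pvBuildA l).insert c (1, (l.length : Int)) := by
        rw [hunfold]; unfold pvStepA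
        rw [hget]; simp [hcont]
      have hfresh : List.findIdx (fun x => x == c) (l ++ [c]) = l.length := by
        have hnone : List.findIdx (fun x => x == c) l = l.length :=
          List.findIdx_eq_length.mpr (fun x hx => beq_eq_false_iff_ne.mpr (fun he => hc (he ▸ hx)))
        rw [List.findIdx_append, hnone, if_neg (by omega)]
        simp [List.findIdx_cons]
      constructor
      · rw [hstep, PySem.Dict.keys_insert_of_not_contains _ _ hcont, ihk, hofl]
        simp [PySem.Set.add]
        exact hc
      · intro c' hc'
        rw [hstep, PySem.Dict.getD_insert]
        by_cases he : c' = c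
        · rw [if_pos he, he, hfresh]
        · have hc'l : c' ∈ l := by
            rcases List.mem_append.mp hc' with h | h
            · exact h
            · simp at h; exact absurd h he
          rw [if_neg he, ihv c' hc'l, pv_findIdx_beq_append l [c] c' hc'l]

-- the running-min fold when no key passes the test
theorem pv_fold_none (cond : Char → Bool) (v : Char → Int) (ks : List Char) (init : Int)
    (h : ∀ k ∈ ks, cond k = false) :
    ks.foldl (fun m k => if cond k then (if v k < m then v k else m) else m) init = init := by
  induction ks generalizing init with
  | nil => rfl
  | cons k rest ih =>
    simp only [List.foldl_cons, h k List.mem_cons_self, Bool.false_eq_true, if_false]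
    exact ih init (fun k' hk' => h k' (List.mem_cons_of_mem _ hk'))

-- the running-min fold never goes below a lower bound it starts at
theorem pv_fold_ge (cond : Char → Bool) (v : Char → Int) (ks : List Char) (j : Int)
    (h : ∀ k ∈ ks, cond k = true → j ≤ v k) :
    ks.foldl (fun m k => if cond k then (if v k < m then v k else m) else m) j = j := by
  induction ks with
  | nil => rfl
  | cons k rest ih =>
    simp only [List.foldl_cons]
    have hstep : (if cond k then (if v k < j then v k else j) else j) = j := by
      by_cases hck : cond k = true
      · rw [if_pos hck, if_neg (not_lt.mpr (h k List.mem_cons_self hck))]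
      · rw [if_neg hck]
    rw [hstep]
    exact ih (fun k' hk' => h k' (List.mem_cons_of_mem _ hk'))

-- the running-min fold reaches an attained lower bound
theorem pv_fold_min (cond : Char → Bool) (v : Char → Int) (ks : List Char) (init j : Int)
    (hj : j ≤ init) (hlb : ∀ k ∈ ks, cond k = true → j ≤ v k)
    (hw : ∃ k ∈ ks, cond k = true ∧ v k = j) :
    ks.foldl (fun m k => if cond k then (if v k < m then v k else m) else m) init = j := by
  induction ks generalizing init with
  | nil => obtain ⟨k, hk, _⟩ := hw; simp at hk
  | cons k rest ih =>
    simp only [List.foldl_cons]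
    obtain ⟨k', hk', hck', hvk'⟩ := hw
    rcases List.mem_cons.mp hk' with he | hrest
    · subst he
      rw [if_pos hck', hvk']
      have : (if j < init then j else init) = j := by
        by_cases hlt : j < init
        · rw [if_pos hlt]
        · rw [if_neg hlt]; omega
      rw [this]
      exact pv_fold_ge cond v rest j (fun k'' hk'' => hlb k'' (List.mem_cons_of_mem _ hk''))
    · have hinit' : j ≤ (if cond k then (if v k < init then v k else init) else init) := by
        by_cases hck : cond k = true
        · rw [if_pos hck]
          have := hlb k List.mem_cons_self hck
          by_cases hlt : v k < init
          · rw [if_pos hlt]; omega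
          · rw [if_neg hlt]; omega
        · rw [if_neg hck]; omega
      exact ih _ hinit' (fun k'' hk'' => hlb k'' (List.mem_cons_of_mem _ hk''))
        ⟨k', hrest, hck', hvk'⟩

-- B's scan returns the char at the first index whose char passes the set test
theorem pv_scanB_spec (pset : PySem.Set Char) (l : List Char) :
    pvScanB pset l =
      match l[List.findIdx (fun c => pset.contains c) l]? with
      | some c => String.ofList [c]
      | none => "$" := by
  induction l with
  | nil => rfl
  | cons c rest ih =>
    by_cases h : pset.contains c = true
    · have hm : c ∈ pset := (PySem.Set.contains_iff pset c).mp h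
      simp [pvScanB, List.findIdx_cons, hm]
    · have hb : pset.contains c = false := by simpa using h
      simp only [pvScanB, hb, Bool.false_eq_true, if_false, List.findIdx_cons, cond_false]
      rw [List.getElem?_cons_succ]
      exact ih

-- ===== VERDICT (by name: the statement is the Claim_ definition above) =====
theorem minimum_indexed_character_spec : Claim_equal_minimum_indexed_character := by
  intro S patt _
  unfold Spec_minimum_indexed_character minimum_indexed_character minimum_indexed_character_alt
  set l := S.toList with hl
  set p := patt.toList with hp
  obtain ⟨hkeys, hidx⟩ := pv_buildA_spec l
  set q : Char → Bool := fun c => (PySem.Set.ofList p).contains c with hq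
  set j := List.findIdx q l with hjdef
  have hmemkeys : ∀ k, k ∈ (pvBuildA l).keys ↔ k ∈ l := by
    intro k; rw [hkeys, PySem.Set.mem_ofList]
  have hcond : ∀ k, PySem.Str.isIn (String.ofList [k]) patt = q k := fun k => pv_cond_eq k patt
  rw [pv_scanB_spec]
  show (if pvScanA (pvBuildA l) patt (l.length : Int) ≠ (l.length : Int)
      then String.ofList [PySem.List.pyGetD l (pvScanA (pvBuildA l) patt (l.length : Int)) ' ']
      else "$") = _
  rw [show List.findIdx (fun c => (PySem.Set.ofList p).contains c) l = j from rfl]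
  by_cases hj : j < l.length
  · -- some char of S is in patt; the first one sits at index j
    have hqj : q l[j] = true := List.findIdx_getElem (w := hj)
    have hcm : l[j] ∈ l := List.getElem_mem hj
    -- first index of l[j] in l is j itself
    have hvj : List.findIdx (fun x => x == l[j]) l = j := by
      set j' := List.findIdx (fun x => x == l[j]) l with hj'def
      have hj'lt : j' < l.length := pv_findIdx_beq_lt l l[j] hcm
      have hle : j' ≤ j := by
        by_contra hcon
        have hlt2 : j < List.findIdx (fun x => x == l[j]) l := by omega
        have := List.not_of_lt_findIdx hlt2
        simp at this
        exact this rfl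
      have hge : j ≤ j' := by
        by_contra hcon
        have hlt : j' < j := by omega
        have heqc : l[j'] = l[j] := by
          have : (l[j'] == l[j]) = true := List.findIdx_getElem (w := hj'lt)
          exact beq_iff_eq.mp this
        have : q l[j'] = false := List.not_of_lt_findIdx hlt
        rw [heqc, hqj] at this
        simp at this
      omega
    have hscan : pvScanA (pvBuildA l) patt (l.length : Int) = (j : Int) := by
      unfold pvScanA
      have := pv_fold_min (fun k => PySem.Str.isIn (String.ofList [k]) patt)
        (fun k => ((pvBuildA l).getD k (0, 0)).2) (pvBuildA l).keys (l.length : Int) (j : Int)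
        (by exact_mod_cast Nat.le_of_lt hj)
        (by
          intro k hk hck
          beta_reduce
          have hkl : k ∈ l := (hmemkeys k).mp hk
          rw [hidx k hkl]
          have hik : List.findIdx (fun x => x == k) l < l.length := pv_findIdx_beq_lt l k hkl
          have heqc : l[List.findIdx (fun x => x == k) l] = k :=
            beq_iff_eq.mp (List.findIdx_getElem (w := hik))
          have hqk : q k = true := by rw [← hcond k]; exact hck
          have : ¬ List.findIdx (fun x => x == k) l < j := by
            intro hcon
            have hfalse : q l[List.findIdx (fun x => x == k) l] = false :=
              List.not_of_lt_findIdx hcon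
            rw [heqc, hqk] at hfalse
            simp at hfalse
          exact_mod_cast Nat.le_of_not_lt this)
        (by
          refine ⟨l[j], (hmemkeys l[j]).mpr hcm, ?_, ?_⟩
          · beta_reduce
            rw [hcond l[j]]; exact hqj
          · beta_reduce
            rw [hidx l[j] hcm, hvj])
      exact this
    rw [hscan]
    have hne : (j : Int) ≠ (l.length : Int) := by
      have : j < l.length := hj
      omega
    rw [if_pos hne, List.getElem?_eq_getElem hj]
    have : PySem.List.pyGetD l (j : Int) ' ' = l[j] := by
      rw [PySem.List.pyGetD_eq_getElem l ' ' (by positivity) (by exact_mod_cast hj)]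
      simp
    rw [this]
  · -- no char of S is in patt
    have hjeq : j = l.length := Nat.le_antisymm List.findIdx_le_length (Nat.le_of_not_lt hj)
    have hnone : ∀ c ∈ l, q c = false := List.findIdx_eq_length.mp hjeq
    have hscan : pvScanA (pvBuildA l) patt (l.length : Int) = (l.length : Int) := by
      unfold pvScanA
      exact pv_fold_none _ _ _ _ (fun k hk => by
        rw [hcond k]; exact hnone k ((hmemkeys k).mp hk))
    rw [hscan, if_neg (by simp)]
    have hnone' : l[j]? = none := List.getElem?_eq_none (by omega)
    rw [hnone']
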